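-- pv_equiv track=rewrite | github.com/ammv/trinkets | MAA/MAAR.py | text_to_values
-- ===== SOURCE A (Python) =====
-- def text_to_values(value_dict, recomp_text):
--     text_list = []
--     skip = False
--     not_value = ''
--     k = 0
--     for i in recomp_text:
--         if skip == True:
--             if i == '>':
--                 skip = False
--                 text_list.append(not_value)
--                 not_value = ''
--             else:
--                 not_value += i
--
--         elif skip == False:
--             if i == '<':
--                 skip = True
--             else:
--                 text_list.append(value_dict[i])
--
--         k += 1
--
--     return text_list
-- ===== SOURCE B (Python) =====
-- def text_to_values(value_dict, recomp_text):
--     # Search-and-slice: consume the text with str.partition instead of a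
--     # char-by-char skip-flag state machine.
--     out = []
--     rest = recomp_text
--     while rest:
--         ch = rest[0]
--         rest = rest[1:]
--         if ch == '<':
--             literal, sep, rest = rest.partition('>')
--             if not sep:  # unclosed '<': everything after it is dropped
--                 break
--             out.append(literal)
--         else:
--             out.append(value_dict[ch])
--     return out
-- ===== Notes on version B (the rewrite author's own statement) =====
-- stated objective: alternative
-- what changed: Replaces the skip-flag/not_value character state machine with a search-and-slice loop that uses str.partition to jump to the matching '>' and take the bracket content in one slice.
import Mathlib
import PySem

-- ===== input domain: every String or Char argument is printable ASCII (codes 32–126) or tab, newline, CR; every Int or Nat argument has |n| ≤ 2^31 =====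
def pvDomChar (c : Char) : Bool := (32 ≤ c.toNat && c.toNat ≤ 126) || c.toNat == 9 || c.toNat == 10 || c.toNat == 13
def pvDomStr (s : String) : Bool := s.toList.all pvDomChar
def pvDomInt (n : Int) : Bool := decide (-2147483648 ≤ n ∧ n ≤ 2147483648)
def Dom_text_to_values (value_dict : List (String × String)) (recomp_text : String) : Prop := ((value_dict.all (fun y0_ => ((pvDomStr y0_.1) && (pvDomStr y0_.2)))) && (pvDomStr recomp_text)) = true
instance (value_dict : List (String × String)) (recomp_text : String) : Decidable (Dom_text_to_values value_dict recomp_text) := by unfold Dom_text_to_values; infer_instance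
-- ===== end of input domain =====

-- B replaces A's skip-flag/not_value character state machine by a search-and-slice
-- loop (str.partition jumps to the matching '>'); same cost, different decomposition.

-- ===== PORT A =====
-- state machine: tl = text_list, skip, nv = not_value (as List Char), k (dead counter kept from A)
def tvGoA (value_dict : List (String × String)) : List Char → List String → Bool → List Char → Int → List String
  | [], tl, _, _, _ => tl
  | i :: rest, tl, skip, nv, k =>
    if skip = true then
      if i = '>' then tvGoA value_dict rest (tl ++ [String.mk nv]) false [] (k + 1)
      else tvGoA value_dict rest tl skip (nv ++ [i]) (k + 1)
    else
      if i = '<' then tvGoA value_dict rest tl true nv (k + 1)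
      -- value_dict[i]: KeyError when absent — excluded by Pre_; getD "" is exact under Pre_
      else tvGoA value_dict rest (tl ++ [(value_dict.lookup (String.mk [i])).getD ""]) skip nv (k + 1)

def text_to_values (value_dict : List (String × String)) (recomp_text : String) : List String :=
  tvGoA value_dict recomp_text.toList [] false [] 0

-- ===== PORT B =====
-- rest.partition('>') with a one-char separator is exact as takeWhile/dropWhile at the first '>'
def tvGoB (value_dict : List (String × String)) : List Char → List String
  | [] => []
  | ch :: rest =>
    if ch = '<' then
      if _h : '>' ∈ rest then
        String.mk (rest.takeWhile (· ≠ '>')) :: tvGoB value_dict ((rest.dropWhile (· ≠ '>')).tail)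
      else []  -- no separator found: break (rest of the text is dropped)
    else ((value_dict.lookup (String.mk [ch])).getD "") :: tvGoB value_dict rest
termination_by l => l.length
decreasing_by
  · have h1 := List.length_dropWhile_le (fun c => decide (c ≠ '>')) rest
    have h2 : ((rest.dropWhile (fun c => decide (c ≠ '>'))).tail).length
        = (rest.dropWhile (fun c => decide (c ≠ '>'))).length - 1 := List.length_tail
    simp at *; omega
  · simp

def text_to_values_alt (value_dict : List (String × String)) (recomp_text : String) : List String :=
  tvGoB value_dict recomp_text.toList

-- ===== PRECONDITION & SPEC =====
-- tvKeys false l = the characters of l lying outside <...> literals: exactly the ones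
-- both programs look up in value_dict (Python raises KeyError when one is not a key).
def tvKeys : Bool → List Char → List Char
  | true, [] => []
  | true, c :: rest => if c = '>' then tvKeys false rest else tvKeys true rest
  | false, [] => []
  | false, c :: rest => if c = '<' then tvKeys true rest else c :: tvKeys false rest

-- Pre_: every character looked up is a key of value_dict (otherwise A raises KeyError).
def Pre_text_to_values (value_dict : List (String × String)) (recomp_text : String) : Prop :=
  (tvKeys false recomp_text.toList).all
    (fun c => (value_dict.lookup (String.mk [c])).isSome) = true
instance (value_dict : List (String × String)) (recomp_text : String) : Decidable (Pre_text_to_values value_dict recomp_text) := by unfold Pre_text_to_values; infer_instance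

def pvWitness_text_to_values : (List (String × String)) × String := ([("a", "1"), ("b", "2")], "ab<x!>a")

def Spec_text_to_values (value_dict : List (String × String)) (recomp_text : String) (out : List String) : Prop := out = text_to_values_alt value_dict recomp_text
instance (value_dict : List (String × String)) (recomp_text : String) (out : List String) : Decidable (Spec_text_to_values value_dict recomp_text out) := by unfold Spec_text_to_values; infer_instance

-- ===== CLAIM (what is proved, stated in full; the proofs are below) =====
def Claim_equal_text_to_values : Prop := ∀ (value_dict : List (String × String)) (recomp_text : String), Dom_text_to_values value_dict recomp_text → Pre_text_to_values value_dict recomp_text → Spec_text_to_values value_dict recomp_text (text_to_values value_dict recomp_text)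

-- ===== LEMMAS AND PROOFS =====

-- the dead counter k never influences the result
lemma tvGoA_k_irrel (vd : List (String × String)) (l : List Char) (tl : List String)
    (skip : Bool) (nv : List Char) (k k' : Int) :
    tvGoA vd l tl skip nv k = tvGoA vd l tl skip nv k' := by
  induction l generalizing tl skip nv k k' with
  | nil => rfl
  | cons c rest ih =>
    simp only [tvGoA]
    split_ifs <;> apply ih

-- what the skip state does: collect up to the first '>' (or drop everything)
lemma tvGoA_skip (vd : List (String × String)) (l : List Char) (tl : List String)
    (nv : List Char) (k : Int) :
    tvGoA vd l tl true nv k =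
      if '>' ∈ l then
        tvGoA vd ((l.dropWhile (· ≠ '>')).tail)
          (tl ++ [String.mk (nv ++ l.takeWhile (· ≠ '>'))]) false [] 0
      else tl := by
  induction l generalizing tl nv k with
  | nil => simp [tvGoA]
  | cons c rest ih =>
    by_cases hc : c = '>'
    · subst hc
      simp only [tvGoA, List.takeWhile_cons, List.dropWhile_cons]
      simpa using tvGoA_k_irrel vd rest (tl ++ [String.mk nv]) false [] (k + 1) 0
    · have hc' : ¬ '>' = c := fun h => hc h.symm
      simp only [tvGoA, if_neg hc]
      rw [ih]
      simp [hc, hc', List.mem_cons]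

lemma tvGoA_eq_tvGoB (vd : List (String × String)) :
    ∀ (n : Nat) (l : List Char), l.length ≤ n → ∀ (tl : List String) (k : Int),
      tvGoA vd l tl false [] k = tl ++ tvGoB vd l := by
  intro n
  induction n with
  | zero =>
    intro l hl tl k
    have : l = [] := List.length_eq_zero_iff.mp (Nat.le_zero.mp hl)
    subst this; simp [tvGoA, tvGoB]
  | succ n ih =>
    intro l hl tl k
    cases l with
    | nil => simp [tvGoA, tvGoB]
    | cons c rest =>
      by_cases hc : c = '<'
      · subst hc
        simp only [tvGoA, Bool.false_eq_true, if_false, reduceIte]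
        rw [tvGoA_skip]
        by_cases hm : '>' ∈ rest
        · have h1 := List.length_dropWhile_le (fun c => decide (c ≠ '>')) rest
          have h2 : ((rest.dropWhile (fun c => decide (c ≠ '>'))).tail).length
              = (rest.dropWhile (fun c => decide (c ≠ '>'))).length - 1 := List.length_tail
          have hlen : ((rest.dropWhile (· ≠ '>')).tail).length ≤ n := by
            simp at hl h1 h2 ⊢; omega
          rw [if_pos hm, ih _ hlen]
          simp [tvGoB, hm]
        · rw [if_neg hm]
          simp [tvGoB, hm]
      · have hlen : rest.length ≤ n := by simp at hl; omega
        simp only [tvGoA, Bool.false_eq_true, if_false, if_neg hc]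
        rw [ih rest hlen]
        simp [tvGoB, hc]

-- ===== VERDICT (by name: the statement is the Claim_ definition above) =====
theorem text_to_values_spec : Claim_equal_text_to_values := by
  intro vd t _dom _pre
  unfold Spec_text_to_values text_to_values text_to_values_alt
  simpa using tvGoA_eq_tvGoB vd t.toList.length t.toList le_rfl [] 0
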